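-- pv_equiv track=rewrite | github.com/aiml-zh/Py3kAiml | aiml/lang/Zh.py | processTag
-- ===== SOURCE A (Python) =====
-- def processTag(seg_list):
--     lsCompile = []
--     try:
--         seg_list = list(seg_list)
--         for i, s in enumerate(seg_list):
--             if s == "BOT" and seg_list[i+1]=="_" and seg_list[i+2]=="NAME":
--                 seg_list[i]="BOT_NAME"
--                 del seg_list[i+2]
--                 del seg_list[i+1]
--                 lsCompile.append(seg_list[i])
--             else:
--                 lsCompile.append(s)
--     except Exception as noBot:
--         return seg_list
--     #
--     return lsCompile
-- ===== SOURCE B (Python) =====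
-- def processTag(seg_list):
--     try:
--         toks = list(seg_list)
--     except TypeError:
--         return seg_list
--     result = []
--     j = 0
--     n = len(toks)
--     while j < n:
--         if toks[j:j+3] == ["BOT", "_", "NAME"]:
--             result.append("BOT_NAME")
--             j += 3
--         else:
--             result.append(toks[j])
--             j += 1
--     return result
-- ===== Notes on version B (the rewrite author's own statement) =====
-- stated objective: simpler
-- what changed: B replaces A's enumerate-over-a-list-mutated-in-place with caught IndexError by a plain non-mutating index scan with an explicit bounds/slice check, appending to a fresh result list.
import Mathlib
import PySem

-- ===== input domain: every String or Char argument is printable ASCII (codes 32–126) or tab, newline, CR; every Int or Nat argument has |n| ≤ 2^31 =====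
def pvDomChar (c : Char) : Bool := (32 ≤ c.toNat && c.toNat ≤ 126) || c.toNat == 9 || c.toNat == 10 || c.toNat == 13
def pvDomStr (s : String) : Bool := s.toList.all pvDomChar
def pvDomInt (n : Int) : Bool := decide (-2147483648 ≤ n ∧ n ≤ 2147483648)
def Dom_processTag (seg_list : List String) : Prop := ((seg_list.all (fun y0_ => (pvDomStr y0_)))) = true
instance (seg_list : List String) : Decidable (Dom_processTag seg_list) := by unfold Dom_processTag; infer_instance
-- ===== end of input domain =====

-- B replaces A's mutate-while-enumerating loop (with its caught IndexError) by a plain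
-- non-mutating scan of the suffix list; objective: simpler. Return-value equivalence only
-- (A mutates its local copy, not the caller's list).

-- ===== PORT A =====
-- Transliteration of A: enumerate over the list being mutated in place; an out-of-range
-- index access (seg[i+1] / seg[i+2], only reached short-circuit-wise) is the caught
-- IndexError, which returns the mutated seg_list itself.
def processTagLoop (seg : List String) (i : Nat) (acc : List String) : List String :=
  if h : i < seg.length then
    let s := seg[i]
    if s = "BOT" then
      match h1 : seg[i+1]? with
      | none => seg            -- IndexError on seg_list[i+1]: except returns seg_list
      | some t =>
        if t = "_" then
          match h2 : seg[i+2]? with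
          | none => seg        -- IndexError on seg_list[i+2]
          | some u =>
            if u = "NAME" then
              -- seg_list[i]="BOT_NAME"; del seg_list[i+2]; del seg_list[i+1]
              processTagLoop (((seg.set i "BOT_NAME").eraseIdx (i+2)).eraseIdx (i+1))
                (i+1) ("BOT_NAME" :: acc)
            else processTagLoop seg (i+1) (s :: acc)
        else processTagLoop seg (i+1) (s :: acc)
    else processTagLoop seg (i+1) (s :: acc)
  else acc.reverse
termination_by seg.length - i
decreasing_by
  · have : i + 2 < seg.length := (List.getElem?_eq_some_iff.mp h2).1
    simp [List.length_eraseIdx, List.length_set]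
    split_ifs <;> omega
  · omega
  · omega
  · omega

def processTag (seg_list : List String) : List String :=
  processTagLoop seg_list 0 []

-- ===== PORT B =====
-- Transliteration of B (Source B): scan with index j, checking the slice toks[j:j+3];
-- the suffix toks[j:] is the recursion argument.
def processTag_alt (l : List String) : List String :=
  if h : l.take 3 = ["BOT", "_", "NAME"] then
    "BOT_NAME" :: processTag_alt (l.drop 3)
  else
    match l with
    | [] => []
    | s :: rest => s :: processTag_alt rest
termination_by l.length
decreasing_by
  · have : 3 ≤ l.length := by
      have := congrArg List.length h
      simp at this
      omega
    simp
    omega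
  · simp

-- ===== PRECONDITION & SPEC =====
def Spec_processTag (seg_list : List String) (out : List String) : Prop := out = processTag_alt seg_list
instance (seg_list : List String) (out : List String) : Decidable (Spec_processTag seg_list out) := by unfold Spec_processTag; infer_instance

-- ===== CLAIM (what is proved, stated in full; the proofs are below) =====
def Claim_equal_processTag : Prop := ∀ (seg_list : List String), Dom_processTag seg_list → Spec_processTag seg_list (processTag seg_list)

-- ===== LEMMAS AND PROOFS =====

lemma alt_nil : processTag_alt [] = [] := by
  rw [processTag_alt]
  rfl

lemma alt_triple (rest : List String) :
    processTag_alt ("BOT" :: "_" :: "NAME" :: rest) = "BOT_NAME" :: processTag_alt rest := by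
  rw [processTag_alt, dif_pos (by simp)]
  simp

lemma alt_cons (s : String) (rest : List String)
    (h : ¬ (s = "BOT" ∧ rest.take 2 = ["_", "NAME"])) :
    processTag_alt (s :: rest) = s :: processTag_alt rest := by
  have hc : ¬ ((s :: rest).take 3 = ["BOT", "_", "NAME"]) := by
    simp only [List.take_succ_cons]
    intro hc
    exact h ⟨by simpa using congrArg (fun l => l.headI) hc, by simpa using congrArg List.tail hc⟩
  rw [processTag_alt, dif_neg hc]

lemma edit_eq : ∀ (pre : List String) (a b c x : String) (rest : List String),
    (((pre ++ a :: b :: c :: rest).set pre.length x).eraseIdx (pre.length + 2)).eraseIdx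
      (pre.length + 1) = pre ++ x :: rest := by
  intro pre
  induction pre with
  | nil => intro a b c x rest; simp [List.eraseIdx]
  | cons p pre ih =>
    intro a b c x rest
    have e1 : (p :: pre).length = pre.length + 1 := rfl
    have e2 : pre.length + 1 + 2 = (pre.length + 2) + 1 := by omega
    have e3 : pre.length + 1 + 1 = (pre.length + 1) + 1 := rfl
    rw [e1, List.cons_append, List.set_cons_succ, e2, List.eraseIdx_cons_succ, e3,
      List.eraseIdx_cons_succ, ih]
    rfl

lemma loop_eq (n : Nat) : ∀ rest pre : List String, rest.length ≤ n →
    processTagLoop (pre ++ rest) pre.length pre.reverse = pre ++ processTag_alt rest := by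
  induction n with
  | zero =>
    intro rest pre h
    have : rest = [] := List.eq_nil_of_length_eq_zero (by omega)
    subst this
    rw [processTagLoop]
    simp [alt_nil]
  | succ n ih =>
    intro rest pre h
    -- the recursion step in the non-merge branches, massaged from ih
    have step : ∀ (s : String) (rest1 : List String), rest1.length ≤ n →
        processTagLoop (pre ++ s :: rest1) (pre.length + 1) (s :: pre.reverse)
          = pre ++ s :: processTag_alt rest1 := by
      intro s rest1 hlen
      have e := ih rest1 (pre ++ [s]) hlen
      rw [show (pre ++ [s]) ++ rest1 = pre ++ s :: rest1 by simp,
        show (pre ++ [s]).length = pre.length + 1 by simp,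
        show (pre ++ [s]).reverse = s :: pre.reverse by simp,
        show (pre ++ [s]) ++ processTag_alt rest1 = pre ++ s :: processTag_alt rest1 by simp] at e
      exact e
    match rest with
    | [] =>
      rw [processTagLoop]
      simp [alt_nil]
    | s :: rest1 =>
      have hlt : pre.length < (pre ++ s :: rest1).length := by simp
      have hget : (pre ++ s :: rest1)[pre.length]'hlt = s := by
        rw [List.getElem_append_right (le_refl pre.length)]
        simp
      have hlen1 : rest1.length ≤ n := by simp at h; omega
      rw [processTagLoop, dif_pos hlt]
      simp only [hget]
      by_cases hs : s = "BOT"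
      · subst hs
        rw [if_pos rfl]
        have h1 : (pre ++ "BOT" :: rest1)[pre.length + 1]? = rest1[0]? := by
          rw [List.getElem?_append_right (by omega)]
          simp
        match rest1 with
        | [] =>
          simp only [List.getElem?_nil] at h1
          split
          · rw [alt_cons "BOT" [] (by simp), alt_nil]
          · rename_i t heq
            rw [h1] at heq
            cases heq
        | t :: rest2 =>
          simp only [List.getElem?_cons_zero] at h1
          split
          · rename_i heq
            rw [h1] at heq
            cases heq
          · rename_i t' heq
            rw [h1] at heq
            injection heq with heq
            subst heq
            by_cases ht : t = "_"
            · subst ht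
              have h2 : (pre ++ "BOT" :: "_" :: rest2)[pre.length + 2]? = rest2[0]? := by
                rw [List.getElem?_append_right (by omega)]
                simp
              rw [if_pos rfl]
              match rest2 with
              | [] =>
                simp only [List.getElem?_nil] at h2
                split
                · rw [alt_cons "BOT" ["_"] (by simp), alt_cons "_" [] (by simp), alt_nil]
                · rename_i u heq2
                  rw [h2] at heq2
                  cases heq2
              | u :: rest3 =>
                simp only [List.getElem?_cons_zero] at h2
                split
                · rename_i heq2
                  rw [h2] at heq2
                  cases heq2
                · rename_i u' heq2
                  rw [h2] at heq2
                  injection heq2 with heq2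
                  subst heq2
                  by_cases hu : u = "NAME"
                  · subst hu
                    rw [if_pos rfl, edit_eq]
                    have e := step "BOT_NAME" rest3 (by simp at h; omega)
                    rw [e, alt_triple]
                  · rw [if_neg hu,
                      step "BOT" ("_" :: u :: rest3) hlen1,
                      alt_cons "BOT" ("_" :: u :: rest3) (by simp [hu])]
            · rw [if_neg ht, step "BOT" (t :: rest2) hlen1,
                alt_cons "BOT" (t :: rest2) (by simp [ht])]
      · rw [if_neg hs, step s rest1 hlen1, alt_cons s rest1 (by simp [hs])]

-- ===== VERDICT (by name: the statement is the Claim_ definition above) =====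
theorem processTag_spec : Claim_equal_processTag := by
  intro seg _
  unfold Spec_processTag processTag
  have := loop_eq seg.length seg [] le_rfl
  simpa using this
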